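-- pv_equiv track=rewrite | github.com/vabresto/vb-kb | kb/generate_legacy_data.py | split_link_target
-- ===== SOURCE A (Python) =====
-- def split_link_target(raw_target: str) -> tuple[str, str]:
--     first_special = len(raw_target)
--     for marker in ("#", "?"):
--         marker_index = raw_target.find(marker)
--         if marker_index != -1:
--             first_special = min(first_special, marker_index)
--     if first_special == len(raw_target):
--         return raw_target, ""
--     return raw_target[:first_special], raw_target[first_special:]
-- ===== SOURCE B (Python) =====
-- def split_link_target(raw_target: str) -> tuple[str, str]:
--     for i, c in enumerate(raw_target):
--         if c == '#' or c == '?':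
--             return raw_target[:i], raw_target[i:]
--     return raw_target, ''
-- ===== Notes on version B (the rewrite author's own statement) =====
-- stated objective: simpler
-- what changed: Replaces A's two separate str.find scans plus a running minimum with one left-to-right pass that stops at the first '#' or '?'.
import Mathlib
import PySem

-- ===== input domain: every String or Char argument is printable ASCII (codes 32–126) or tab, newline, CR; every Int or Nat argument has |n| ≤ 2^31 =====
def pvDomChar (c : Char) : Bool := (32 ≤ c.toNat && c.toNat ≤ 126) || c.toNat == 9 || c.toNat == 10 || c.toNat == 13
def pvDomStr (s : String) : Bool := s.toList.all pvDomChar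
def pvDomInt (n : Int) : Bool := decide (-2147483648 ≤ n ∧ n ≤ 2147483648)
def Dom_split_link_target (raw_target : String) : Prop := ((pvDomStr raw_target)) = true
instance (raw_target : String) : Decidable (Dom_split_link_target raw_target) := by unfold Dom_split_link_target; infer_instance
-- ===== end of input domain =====

-- B replaces A's two separate str.find scans + running minimum with one left-to-right
-- pass that stops at the first '#' or '?' (objective: simpler).

-- ===== PORT A =====
def split_link_target (raw_target : String) : String × String :=
  let first_special : Int :=
    (["#", "?"] : List String).foldl (fun fs marker =>
      let marker_index := PySem.Str.find raw_target marker
      if marker_index ≠ -1 then min fs marker_index else fs)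
      (PySem.Str.len raw_target)
  if first_special = PySem.Str.len raw_target then (raw_target, "")
  else (PySem.Str.slice raw_target none (some first_special),
        PySem.Str.slice raw_target (some first_special) none)

-- ===== PORT B =====
def pvSplitLoop (raw : String) : List (Int × Char) → String × String
  | [] => (raw, "")
  | (i, c) :: rest =>
    if c == '#' || c == '?' then
      (PySem.Str.slice raw none (some i), PySem.Str.slice raw (some i) none)
    else pvSplitLoop raw rest

def split_link_target_alt (raw_target : String) : String × String :=
  pvSplitLoop raw_target (PySem.List.enumerate raw_target.toList 0)

-- ===== PRECONDITION & SPEC =====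
def Spec_split_link_target (raw_target : String) (out : String × String) : Prop := out = split_link_target_alt raw_target
instance (raw_target : String) (out : String × String) : Decidable (Spec_split_link_target raw_target out) := by unfold Spec_split_link_target; infer_instance

-- ===== CLAIM (what is proved, stated in full; the proofs are below) =====
def Claim_equal_split_link_target : Prop := ∀ (raw_target : String), Dom_split_link_target raw_target → Spec_split_link_target raw_target (split_link_target raw_target)

-- ===== LEMMAS AND PROOFS =====

-- [m] is a prefix of (cs.drop j) iff the character at j is m
theorem pv_pref_drop (cs : List Char) (j : Nat) (m : Char) :
    ([m] <+: cs.drop j) ↔ cs[j]? = some m := by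
  rw [← List.head?_drop]
  constructor
  · rintro ⟨t, ht⟩
    cases h : cs.drop j with
    | nil => simp [h] at ht
    | cons a t' => rw [h] at ht; simp at ht ⊢; exact ht.1.symm
  · intro h
    cases hd : cs.drop j with
    | nil => simp [hd] at h
    | cons a t' =>
      rw [hd] at h; simp at h
      exact ⟨t', by simp [h]⟩

-- single-character find in terms of findIdx
theorem pv_find_single (cs : List Char) (m : Char) :
    PySem.Chars.find cs [m] =
      if cs.findIdx (· == m) < cs.length then ((cs.findIdx (· == m) : Nat) : Int) else -1 := by
  by_cases hm : m ∈ cs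
  · have hinf : [m] <:+: cs := by
      obtain ⟨s, t, rfl⟩ := List.append_of_mem hm
      exact ⟨s, t, by simp⟩
    have h0 : 0 ≤ PySem.Chars.find cs [m] := (PySem.Chars.find_nonneg_iff cs [m]).2 hinf
    obtain ⟨pref, hmin⟩ := PySem.Chars.find_spec h0
    set f := (PySem.Chars.find cs [m]).toNat with hf
    have hget : cs[f]? = some m := (pv_pref_drop cs f m).1 pref
    have hflt : f < cs.length := by
      by_contra hge
      rw [List.getElem?_eq_none (by omega)] at hget
      simp at hget
    have hgf : cs[f] = m := by
      rw [List.getElem?_eq_getElem hflt] at hget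
      exact Option.some.inj hget
    have hidx : cs.findIdx (· == m) = f := by
      rw [List.findIdx_eq hflt]
      refine ⟨by simp [hgf], ?_⟩
      intro j hj
      have hj2 := hmin j (by omega)
      rw [pv_pref_drop] at hj2
      rw [List.getElem?_eq_getElem (by omega : j < cs.length)] at hj2
      simpa using fun h => hj2 (by rw [h])
    rw [hidx, if_pos hflt, hf]
    omega
  · have hninf : ¬ [m] <:+: cs := fun h => hm (h.sublist.subset (List.mem_singleton_self m))
    rw [(PySem.Chars.find_eq_neg_one_iff cs [m]).2 hninf]
    have : cs.findIdx (· == m) = cs.length := by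
      rw [List.findIdx_eq_length]
      intro x hx
      simpa using fun h : x = m => hm (h ▸ hx)
    simp [this]

-- findIdx of a disjunction is the min of the findIdx's
theorem pv_findIdx_or (cs : List Char) (p q : Char → Bool) :
    cs.findIdx (fun c => p c || q c) = min (cs.findIdx p) (cs.findIdx q) := by
  induction cs with
  | nil => simp
  | cons c t ih =>
    by_cases hp : p c
    · simp [List.findIdx_cons, hp]
    · by_cases hq : q c
      · simp [List.findIdx_cons, hp, hq]
      · simp only [List.findIdx_cons, hp, hq, Bool.false_or, cond_false, ih]
        omega

-- B's loop over an enumerated suffix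
theorem pv_loop_spec (raw : String) (l : List Char) (j : Int) :
    pvSplitLoop raw (PySem.List.enumerate l j) =
      if l.findIdx (fun c => c == '#' || c == '?') < l.length then
        (PySem.Str.slice raw none (some (j + (l.findIdx (fun c => c == '#' || c == '?') : Nat))),
         PySem.Str.slice raw (some (j + (l.findIdx (fun c => c == '#' || c == '?') : Nat))) none)
      else (raw, "") := by
  induction l generalizing j with
  | nil => simp [PySem.List.enumerate_nil, pvSplitLoop]
  | cons c t ih =>
    rw [PySem.List.enumerate_cons]
    by_cases h : (c == '#' || c == '?') = true
    · simp [pvSplitLoop, h, List.findIdx_cons]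
    · have hb : (c == '#' || c == '?') = false := by simpa using h
      rw [show pvSplitLoop raw ((j, c) :: PySem.List.enumerate t (j + 1)) =
            pvSplitLoop raw (PySem.List.enumerate t (j + 1)) from by simp [pvSplitLoop, hb], ih]
      rw [List.findIdx_cons, hb]
      simp only [cond_false, List.length_cons]
      have hidx : j + 1 + ((t.findIdx fun c => c == '#' || c == '?' : Nat) : Int)
          = j + (((t.findIdx fun c => c == '#' || c == '?') + 1 : Nat) : Int) := by
        push_cast; ring
      rw [hidx]
      split_ifs with h1 h2 h2 <;> first | rfl | omega

-- ===== VERDICT (by name: the statement is the Claim_ definition above) =====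
theorem split_link_target_spec : Claim_equal_split_link_target := by
  intro raw _
  unfold Spec_split_link_target split_link_target split_link_target_alt
  rw [pv_loop_spec]
  set cs := raw.toList with hcs
  set K := cs.findIdx (fun c => c == '#' || c == '?') with hK
  have hKmin : K = min (cs.findIdx (· == '#')) (cs.findIdx (· == '?')) := pv_findIdx_or cs _ _
  have h1le : cs.findIdx (· == '#') ≤ cs.length := List.findIdx_le_length
  have h2le : cs.findIdx (· == '?') ≤ cs.length := List.findIdx_le_length
  have hlen : PySem.Str.len raw = (cs.length : Int) := by
    simp [PySem.Str.len, hcs]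
  have e1 : PySem.Str.find raw "#" =
      (if cs.findIdx (· == '#') < cs.length then ((cs.findIdx (· == '#') : Nat) : Int) else -1) := by
    rw [show PySem.Str.find raw "#" = PySem.Chars.find cs ['#'] from by simp [hcs]]
    exact pv_find_single cs '#'
  have e2 : PySem.Str.find raw "?" =
      (if cs.findIdx (· == '?') < cs.length then ((cs.findIdx (· == '?') : Nat) : Int) else -1) := by
    rw [show PySem.Str.find raw "?" = PySem.Chars.find cs ['?'] from by simp [hcs]]
    exact pv_find_single cs '?'
  simp only [List.foldl_cons, List.foldl_nil, e1, e2, hlen]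
  have hFS : (let marker_index :=
        if cs.findIdx (· == '?') < cs.length then ((cs.findIdx (· == '?') : Nat) : Int) else -1;
      if marker_index ≠ -1 then
        min (let mi1 := if cs.findIdx (· == '#') < cs.length then ((cs.findIdx (· == '#') : Nat) : Int) else -1;
          if mi1 ≠ -1 then min ((cs.length : Nat) : Int) mi1 else ((cs.length : Nat) : Int)) marker_index
      else (let mi1 := if cs.findIdx (· == '#') < cs.length then ((cs.findIdx (· == '#') : Nat) : Int) else -1;
        if mi1 ≠ -1 then min ((cs.length : Nat) : Int) mi1 else ((cs.length : Nat) : Int))) = (K : Int) := by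
    by_cases c1 : cs.findIdx (· == '#') < cs.length <;>
      by_cases c2 : cs.findIdx (· == '?') < cs.length <;>
      simp only [c1, c2, if_true, if_false] <;>
      simp only [hKmin] <;> split_ifs <;> push_cast <;> omega
  simp only at hFS ⊢
  rw [hFS]
  by_cases hKlt : K < cs.length
  · rw [if_neg (by exact_mod_cast Nat.ne_of_lt hKlt), if_pos hKlt]
    norm_num
  · have hKe : K = cs.length := by omega
    rw [if_pos (by exact_mod_cast hKe), if_neg hKlt]
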